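-- pv_equiv track=rewrite | github.com/AntonSidaras/ircgpio_lite | irrecord.py | __count
-- ===== SOURCE A (Python) =====
-- def __count(lst):
-- 	map = []
-- 	for l in lst:
-- 		fq = 0
-- 		for r in lst:
-- 			if l == r:
-- 				fq = fq + 1
-- 		map.append([l,fq])
--
-- 	res = []
--
-- 	for i in range (0,len(map)):
-- 		if i == 0:
-- 			res.append(map[i])
-- 		else:
-- 			if map[i] not in res:
-- 				res.append(map[i])
--
-- 	return res
-- ===== SOURCE B (Python) =====
-- def __count(lst):
-- 	seen = []
-- 	for l in lst:
-- 		if l not in seen: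
-- 			seen.append(l)
-- 	res = []
-- 	for v in seen:
-- 		fq = sum(1 for r in lst if v == r)
-- 		res.append([v, fq])
-- 	return res
-- ===== Notes on version B (the rewrite author's own statement) =====
-- stated objective: alternative
-- what changed: A counts every element (building a pair per occurrence) and then deduplicates whole [value,count] pairs; B first collects the distinct values in first-occurrence order and then counts each distinct value once, so the dedup-of-pairs pass disappears.
import Mathlib
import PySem

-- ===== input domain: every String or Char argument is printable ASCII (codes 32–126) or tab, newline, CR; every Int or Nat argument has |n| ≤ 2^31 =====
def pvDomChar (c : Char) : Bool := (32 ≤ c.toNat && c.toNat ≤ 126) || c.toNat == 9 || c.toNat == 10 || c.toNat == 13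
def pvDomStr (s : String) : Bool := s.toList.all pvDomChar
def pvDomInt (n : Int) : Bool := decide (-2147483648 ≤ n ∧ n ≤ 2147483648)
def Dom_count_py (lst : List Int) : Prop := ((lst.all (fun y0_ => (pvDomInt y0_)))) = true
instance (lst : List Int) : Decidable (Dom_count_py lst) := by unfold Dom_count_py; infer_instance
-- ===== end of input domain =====

-- B first collects distinct values in first-occurrence order, then counts each distinct value once;
-- A counts per occurrence and deduplicates whole [value,count] pairs. Same return value; alternative decomposition.

-- ===== PORT A =====
-- inner loop: fq = 0; for r in lst: if l == r: fq += 1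
def countA_freq (lst : List Int) (l : Int) : Int :=
  lst.foldl (fun fq r => if l = r then fq + 1 else fq) 0

-- for i in range(0, len(map)): if i == 0: res.append(map[i]) else: if map[i] not in res: res.append(map[i])
def countA_resLoop (pairs : List (List Int)) (i : Int) (res : List (List Int)) : List (List Int) :=
  match pairs with
  | [] => res
  | m :: t =>
      countA_resLoop t (i + 1)
        (if i = 0 then res ++ [m] else if m ∈ res then res else res ++ [m])

def count_py (lst : List Int) : List (List Int) :=
  let map := lst.foldl (fun map l => map ++ [[l, countA_freq lst l]]) []
  countA_resLoop map 0 []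

-- ===== PORT B =====
-- fq = sum(1 for r in lst if v == r)
def countB_freq (lst : List Int) (v : Int) : Int :=
  lst.foldl (fun fq r => if v = r then fq + 1 else fq) 0

def count_py_alt (lst : List Int) : List (List Int) :=
  let seen := lst.foldl (fun seen l => if l ∈ seen then seen else seen ++ [l]) []
  seen.foldl (fun res v => res ++ [[v, countB_freq lst v]]) []

-- ===== PRECONDITION & SPEC =====
def Spec_count_py (lst : List Int) (out : List (List Int)) : Prop := out = count_py_alt lst
instance (lst : List Int) (out : List (List Int)) : Decidable (Spec_count_py lst out) := by unfold Spec_count_py; infer_instance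

-- ===== CLAIM (what is proved, stated in full; the proofs are below) =====
def Claim_equal_count_py : Prop := ∀ (lst : List Int), Dom_count_py lst → Spec_count_py lst (count_py lst)

-- ===== LEMMAS AND PROOFS =====

-- A's map-building fold is a List.map
lemma countA_map_eq (lst : List Int) :
    lst.foldl (fun map l => map ++ [[l, countA_freq lst l]]) [] =
      lst.map (fun l => [l, countA_freq lst l]) := by
  have h : ∀ (xs : List Int) (acc : List (List Int)),
      xs.foldl (fun map l => map ++ [[l, countA_freq lst l]]) acc =
        acc ++ xs.map (fun l => [l, countA_freq lst l]) := by
    intro xs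
    induction xs with
    | nil => simp [List.foldl]
    | cons x t ih => intro acc; simp [List.foldl, ih, List.append_assoc]
  simpa using h lst []

-- pair membership reduces to value membership
lemma pair_mem (lst : List Int) (l : Int) (seen : List Int) :
    [l, countA_freq lst l] ∈ seen.map (fun v => [v, countA_freq lst v]) ↔ l ∈ seen := by
  constructor
  · intro h
    rcases List.mem_map.mp h with ⟨v, hv, he⟩
    cases he; exact hv
  · intro h
    exact List.mem_map.mpr ⟨l, h, rfl⟩

-- resLoop with nonzero index is a pure membership dedup fold
lemma resLoop_pos (lst : List Int) :
    ∀ (xs : List Int) (i : Int) (res : List (List Int)), 0 < i →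
      countA_resLoop (xs.map (fun l => [l, countA_freq lst l])) i res =
        xs.foldl (fun res l => if [l, countA_freq lst l] ∈ res then res else res ++ [[l, countA_freq lst l]]) res := by
  intro xs
  induction xs with
  | nil => intro i res _; simp [countA_resLoop]
  | cons x t ih =>
      intro i res hi
      simp only [List.map, countA_resLoop, List.foldl, if_neg (by omega : ¬ i = 0)]
      exact ih (i + 1) _ (by omega)

-- main invariant: dedup-of-pairs fold = map over dedup-of-values fold
lemma dedup_invariant (lst : List Int) :
    ∀ (xs : List Int) (seen : List Int),
      xs.foldl (fun res l => if [l, countA_freq lst l] ∈ res then res else res ++ [[l, countA_freq lst l]])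
        (seen.map (fun v => [v, countA_freq lst v])) =
      (xs.foldl (fun seen l => if l ∈ seen then seen else seen ++ [l]) seen).map
        (fun v => [v, countA_freq lst v]) := by
  intro xs
  induction xs with
  | nil => intro seen; simp [List.foldl]
  | cons x t ih =>
      intro seen
      simp only [List.foldl]
      by_cases hx : x ∈ seen
      · rw [if_pos ((pair_mem lst x seen).mpr hx), if_pos hx, ih]
      · rw [if_neg (fun h => hx ((pair_mem lst x seen).mp h)), if_neg hx]
        rw [show (List.map (fun v => [v, countA_freq lst v]) seen ++ [[x, countA_freq lst x]]) =
            List.map (fun v => [v, countA_freq lst v]) (seen ++ [x]) by simp]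
        exact ih (seen ++ [x])

-- B's result fold is a List.map
lemma countB_map_eq (lst : List Int) (seen : List Int) :
    seen.foldl (fun res v => res ++ [[v, countB_freq lst v]]) [] =
      seen.map (fun v => [v, countB_freq lst v]) := by
  have h : ∀ (xs : List Int) (acc : List (List Int)),
      xs.foldl (fun res v => res ++ [[v, countB_freq lst v]]) acc =
        acc ++ xs.map (fun v => [v, countB_freq lst v]) := by
    intro xs
    induction xs with
    | nil => simp [List.foldl]
    | cons x t ih => intro acc; simp [List.foldl, ih, List.append_assoc]
  simpa using h seen []

-- ===== VERDICT (by name: the statement is the Claim_ definition above) =====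
theorem count_py_spec : Claim_equal_count_py := by
  intro lst _
  show count_py lst = count_py_alt lst
  unfold count_py count_py_alt
  rw [countA_map_eq, countB_map_eq]
  have hAB : countB_freq lst = countA_freq lst := rfl
  rw [hAB]
  cases lst with
  | nil => simp [countA_resLoop, List.foldl]
  | cons x t =>
      -- first iteration: i = 0, res = [], appends unconditionally
      simp only [List.map, countA_resLoop, List.foldl, if_true, List.not_mem_nil,
        if_false, List.nil_append, zero_add]
      rw [resLoop_pos (x :: t) t 1 _ (by omega)]
      have h0 : ([[x, countA_freq (x :: t) x]] : List (List Int)) =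
          ([x] : List Int).map (fun v => [v, countA_freq (x :: t) v]) := by simp
      rw [h0, dedup_invariant (x :: t) t [x]]
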